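-- pv_equiv track=rewrite | github.com/HaimL76/Networks | read-wiki-dump/read_sql_dump.py | get_full_hierarchy
-- ===== SOURCE A (Python) =====
-- def get_full_hierarchy(page_id, category_map, category_ids, visited=None):
--     if visited is None:
--         visited = set()
--
--     if page_id in visited:
--         return []  # Avoid cycles
--
--     visited.add(page_id)
--     hierarchy = []
--
--     if page_id in category_map:
--         for category in category_map[page_id]:
--             hierarchy.append(category)
--             # Find this category's page_id and recurse
--             if category in category_ids:
--                 cat_page_id = category_ids[category]
--                 parent_cats = get_full_hierarchy(cat_page_id, category_map,
--                                                  category_ids, visited)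
--                 hierarchy.extend(parent_cats)
--
--     return hierarchy
-- ===== SOURCE B (Python) =====
-- def get_full_hierarchy(page_id, category_map, category_ids, visited=None):
--     # Iterative DFS with an explicit stack of iterators (same pre-order output,
--     # same visited-set mutation as the recursive original).
--     if visited is None:
--         visited = set()
--     if page_id in visited:
--         return []
--     visited.add(page_id)
--     result = []
--     stack = [iter(category_map.get(page_id, []))]
--     while stack:
--         try:
--             category = next(stack[-1])
--         except StopIteration:
--             stack.pop()
--             continue
--         result.append(category)
--         if category in category_ids:
--             cat_page_id = category_ids[category]
--             if cat_page_id not in visited: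
--                 visited.add(cat_page_id)
--                 stack.append(iter(category_map.get(cat_page_id, [])))
--     return result
-- ===== Notes on version B (the rewrite author's own statement) =====
-- stated objective: alternative
-- what changed: Replaces A's recursive DFS by an iterative DFS using an explicit stack of iterators over the category lists, producing the identical pre-order sequence and the identical mutation of the caller's visited set.
import Mathlib
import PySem

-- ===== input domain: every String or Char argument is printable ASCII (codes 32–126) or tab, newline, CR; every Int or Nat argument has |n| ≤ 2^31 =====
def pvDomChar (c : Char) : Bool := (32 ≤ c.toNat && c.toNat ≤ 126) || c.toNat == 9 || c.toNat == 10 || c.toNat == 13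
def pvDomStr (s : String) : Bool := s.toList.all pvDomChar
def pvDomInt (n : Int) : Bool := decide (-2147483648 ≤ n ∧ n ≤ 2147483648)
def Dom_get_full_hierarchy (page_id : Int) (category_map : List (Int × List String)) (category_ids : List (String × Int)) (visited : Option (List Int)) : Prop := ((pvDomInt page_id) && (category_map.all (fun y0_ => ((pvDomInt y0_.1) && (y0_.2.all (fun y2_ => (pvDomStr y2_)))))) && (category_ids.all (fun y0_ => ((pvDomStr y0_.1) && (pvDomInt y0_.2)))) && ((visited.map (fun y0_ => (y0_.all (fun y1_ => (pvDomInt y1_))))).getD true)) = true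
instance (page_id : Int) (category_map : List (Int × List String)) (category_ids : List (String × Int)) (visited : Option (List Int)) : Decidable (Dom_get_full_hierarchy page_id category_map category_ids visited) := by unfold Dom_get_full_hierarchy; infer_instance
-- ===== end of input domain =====

-- B replaces A's recursive DFS by an iterative DFS over an explicit stack of unfinished
-- category lists (same pre-order output).  A mutates the passed-in `visited` set in place
-- (so does B, identically); the equivalence proved here is about the RETURN value only.

-- ===== PORT A =====
-- dict lookup (first match in the association list)
def pvLookupMap (category_map : List (Int × List String)) (k : Int) : Option (List String) :=
  (category_map.find? (fun p => p.1 == k)).map (·.2)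

def pvLookupIds (category_ids : List (String × Int)) (c : String) : Option Int :=
  (category_ids.find? (fun p => p.1 == c)).map (·.2)

-- number of dict values not yet visited: the part of both termination measures that
-- strictly drops whenever the DFS descends into a new page id
def pvUnseen (category_ids : List (String × Int)) (visited : PySem.Set Int) : Nat :=
  ((category_ids.map Prod.snd).filter (fun x => !(PySem.Set.contains visited x))).length

-- the value found by a dict lookup is one of the dict's values
theorem pvLookupIds_mem_values {category_ids : List (String × Int)} {c : String} {p : Int}
    (h : pvLookupIds category_ids c = some p) : p ∈ category_ids.map Prod.snd := by
  unfold pvLookupIds at h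
  cases hf : category_ids.find? (fun q => q.1 == c) with
  | none => simp [hf] at h
  | some q =>
    simp [hf] at h
    exact h ▸ List.mem_map_of_mem (List.mem_of_find?_eq_some hf)

-- strict decrease of the unvisited-values count on a descend step (cited by pvRun's
-- decreasing_by, and by the fuel-sufficiency argument of the bridge proof below)
theorem pvUnseen_add_lt {category_ids : List (String × Int)} {c : String} {p : Int}
    (visited : PySem.Set Int) (hl : pvLookupIds category_ids c = some p)
    (hnv : PySem.Set.contains visited p = false) :
    pvUnseen category_ids (PySem.Set.add visited p) < pvUnseen category_ids visited := by
  unfold pvUnseen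
  have hmem : p ∈ (category_ids.map Prod.snd).filter (fun x => !(PySem.Set.contains visited x)) := by
    simp only [List.mem_filter]
    exact ⟨pvLookupIds_mem_values hl, by simpa using hnv⟩
  have hqp : ∀ x ∈ category_ids.map Prod.snd,
      ((!(PySem.Set.contains (PySem.Set.add visited p) x)) && (!(PySem.Set.contains visited x)))
        = (!(PySem.Set.contains (PySem.Set.add visited p) x)) := by
    intro x _
    cases hq : PySem.Set.contains (PySem.Set.add visited p) x with
    | true => simp
    | false =>
      have hna : x ∉ PySem.Set.add visited p := by simpa using hq
      have hnx : x ∉ visited := fun hx => hna ((PySem.Set.mem_add visited p x).2 (Or.inl hx))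
      simpa using hnx
  have h1 : ((category_ids.map Prod.snd).filter (fun x => !(PySem.Set.contains visited x))).filter
        (fun x => !(PySem.Set.contains (PySem.Set.add visited p) x))
      = (category_ids.map Prod.snd).filter (fun x => !(PySem.Set.contains (PySem.Set.add visited p) x)) := by
    rw [List.filter_filter]
    exact List.filter_congr hqp
  rw [← h1, List.length_filter_lt_length_iff_exists]
  exact ⟨p, hmem, by simp [PySem.Set.mem_add]⟩

mutual
-- A's recursion; threads the mutated `visited` set.  The fuel argument only makes the
-- recursion total: the bridge proof below shows it never runs out at the fuel
-- `get_full_hierarchy` supplies.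
def pvGoA (category_map : List (Int × List String)) (category_ids : List (String × Int)) :
    Nat → Int → PySem.Set Int → List String × PySem.Set Int
  | 0, _, visited => ([], visited)
  | Nat.succ n, page_id, visited =>
    if PySem.Set.contains visited page_id then ([], visited)
    else
      let visited1 := PySem.Set.add visited page_id
      match pvLookupMap category_map page_id with
      | none => ([], visited1)
      | some cats => pvGoList category_map category_ids n cats visited1
termination_by n _ _ => (n, 0)

-- the `for category in category_map[page_id]:` loop of A
def pvGoList (category_map : List (Int × List String)) (category_ids : List (String × Int)) :
    Nat → List String → PySem.Set Int → List String × PySem.Set Int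
  | _, [], visited => ([], visited)
  | n, c :: cs, visited =>
    match pvLookupIds category_ids c with
    | none =>
      let r := pvGoList category_map category_ids n cs visited
      (c :: r.1, r.2)
    | some p =>
      let r1 := pvGoA category_map category_ids n p visited
      let r2 := pvGoList category_map category_ids n cs r1.2
      (c :: r1.1 ++ r2.1, r2.2)
termination_by n cats _ => (n, cats.length + 1)
end

def get_full_hierarchy (page_id : Int) (category_map : List (Int × List String)) (category_ids : List (String × Int)) (visited : Option (List Int)) : List String :=
  (pvGoA category_map category_ids (category_ids.length + 2) page_id
    (PySem.Set.ofList (visited.getD []))).1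

-- ===== PORT B =====
-- the `while stack:` loop of B; each frame holds the values an iterator has not yielded yet
def pvRun (category_map : List (Int × List String)) (category_ids : List (String × Int)) :
    List (List String) → PySem.Set Int → List String × PySem.Set Int
  | [], visited => ([], visited)
  | [] :: S, visited => pvRun category_map category_ids S visited
  | (c :: cs) :: S, visited =>
    match hl : pvLookupIds category_ids c with
    | some p =>
      if PySem.Set.contains visited p then
        let r := pvRun category_map category_ids (cs :: S) visited
        (c :: r.1, r.2)
      else
        let r := pvRun category_map category_ids
          (((pvLookupMap category_map p).getD []) :: cs :: S) (PySem.Set.add visited p)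
        (c :: r.1, r.2)
    | none =>
      let r := pvRun category_map category_ids (cs :: S) visited
      (c :: r.1, r.2)
termination_by S visited => (pvUnseen category_ids visited, S.foldr (fun f a => f.length + 1 + a) 0)
decreasing_by
  · apply Prod.Lex.right; simp
  · apply Prod.Lex.right; simp
  · apply Prod.Lex.left
    exact pvUnseen_add_lt visited hl (by simp_all)
  · apply Prod.Lex.right; simp

def get_full_hierarchy_alt (page_id : Int) (category_map : List (Int × List String)) (category_ids : List (String × Int)) (visited : Option (List Int)) : List String :=
  let v := PySem.Set.ofList (visited.getD [])
  if PySem.Set.contains v page_id then []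
  else
    (pvRun category_map category_ids [((pvLookupMap category_map page_id).getD [])]
      (PySem.Set.add v page_id)).1

-- ===== PRECONDITION & SPEC =====
def Spec_get_full_hierarchy (page_id : Int) (category_map : List (Int × List String)) (category_ids : List (String × Int)) (visited : Option (List Int)) (out : List String) : Prop := out = get_full_hierarchy_alt page_id category_map category_ids visited
instance (page_id : Int) (category_map : List (Int × List String)) (category_ids : List (String × Int)) (visited : Option (List Int)) (out : List String) : Decidable (Spec_get_full_hierarchy page_id category_map category_ids visited out) := by unfold Spec_get_full_hierarchy; infer_instance

-- ===== CLAIM (what is proved, stated in full; the proofs are below) =====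
def Claim_equal_get_full_hierarchy : Prop := ∀ (page_id : Int) (category_map : List (Int × List String)) (category_ids : List (String × Int)) (visited : Option (List Int)), Dom_get_full_hierarchy page_id category_map category_ids visited → Spec_get_full_hierarchy page_id category_map category_ids visited (get_full_hierarchy page_id category_map category_ids visited)

-- ===== LEMMAS AND PROOFS =====

-- A's loop only adds elements to `visited`
theorem pvGo_mono :
    ∀ (fuel : Nat) (category_map : List (Int × List String)) (category_ids : List (String × Int)),
      (∀ (pid : Int) (v : PySem.Set Int) (x : Int), x ∈ v →
        x ∈ (pvGoA category_map category_ids fuel pid v).2) ∧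
      (∀ (cats : List String) (v : PySem.Set Int) (x : Int), x ∈ v →
        x ∈ (pvGoList category_map category_ids fuel cats v).2) := by
  intro fuel cmap cids
  induction fuel with
  | zero =>
    have hA : ∀ (pid : Int) (v : PySem.Set Int) (x : Int), x ∈ v →
        x ∈ (pvGoA cmap cids 0 pid v).2 := by
      intro pid v x hx; simpa [pvGoA] using hx
    refine ⟨hA, ?_⟩
    intro cats
    induction cats with
    | nil => intro v x hx; simpa [pvGoList] using hx
    | cons c cs ih =>
      intro v x hx
      cases h : pvLookupIds cids c with
      | none => simpa [pvGoList, h] using ih v x hx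
      | some p => simpa [pvGoList, h] using ih _ x (hA p v x hx)
  | succ n ihn =>
    have hA : ∀ (pid : Int) (v : PySem.Set Int) (x : Int), x ∈ v →
        x ∈ (pvGoA cmap cids (n + 1) pid v).2 := by
      intro pid v x hx
      by_cases hc : pid ∈ v
      · simpa [pvGoA, hc] using hx
      · have hx1 : x ∈ PySem.Set.add v pid := (PySem.Set.mem_add v pid x).2 (Or.inl hx)
        cases h : pvLookupMap cmap pid with
        | none => simpa [pvGoA, hc, h] using hx1
        | some cats => simpa [pvGoA, hc, h] using ihn.2 cats _ x hx1
    refine ⟨hA, ?_⟩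
    intro cats
    induction cats with
    | nil => intro v x hx; simpa [pvGoList] using hx
    | cons c cs ih =>
      intro v x hx
      cases h : pvLookupIds cids c with
      | none => simpa [pvGoList, h] using ih v x hx
      | some p => simpa [pvGoList, h] using ih _ x (hA p v x hx)

-- pvUnseen is antitone in the visited set
theorem pvUnseen_mono {category_ids : List (String × Int)} {v w : PySem.Set Int}
    (h : ∀ x : Int, x ∈ v → x ∈ w) : pvUnseen category_ids w ≤ pvUnseen category_ids v := by
  unfold pvUnseen
  refine (List.monotone_filter_right _ ?_).length_le
  intro a ha
  have hna : a ∉ w := by simpa using ha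
  have : a ∉ v := fun hv => hna (h a hv)
  simpa using this

-- on an unvisited page id, one step of A's recursion is A's loop on the page's
-- category list (the empty list when the page has none)
theorem pvGoA_succ_not_mem {category_map : List (Int × List String)}
    {category_ids : List (String × Int)} {n : Nat} {p : Int} {v : PySem.Set Int}
    (hp : p ∉ v) :
    pvGoA category_map category_ids (n + 1) p v =
      pvGoList category_map category_ids n ((pvLookupMap category_map p).getD [])
        (PySem.Set.add v p) := by
  cases h : pvLookupMap category_map p with
  | none => simp [pvGoA, pvGoList, hp, h]
  | some cats => simp [pvGoA, hp, h]

-- the unseen count is at most the number of dict entries (fuel sufficiency at top level)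
theorem pvUnseen_le (category_ids : List (String × Int)) (v : PySem.Set Int) :
    pvUnseen category_ids v ≤ category_ids.length := by
  unfold pvUnseen
  calc _ ≤ (category_ids.map Prod.snd).length := List.length_filter_le _ _
    _ = category_ids.length := List.length_map ..

-- the bridge: B's stack machine run with `cats` on top of stack S computes A's loop on
-- `cats` and then continues with S, provided the fuel exceeds the unseen count
theorem pvBridge :
    ∀ (fuel : Nat) (category_map : List (Int × List String)) (category_ids : List (String × Int))
      (cats : List String) (S : List (List String)) (v : PySem.Set Int),
      pvUnseen category_ids v + 1 ≤ fuel →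
      pvRun category_map category_ids (cats :: S) v =
        ((pvGoList category_map category_ids fuel cats v).1 ++
          (pvRun category_map category_ids S (pvGoList category_map category_ids fuel cats v).2).1,
         (pvRun category_map category_ids S (pvGoList category_map category_ids fuel cats v).2).2) := by
  intro fuel cmap cids
  induction fuel using Nat.strong_induction_on with
  | _ fuel ihf =>
  intro cats
  induction cats with
  | nil =>
    intro S v _
    simp [pvRun, pvGoList]
  | cons c cs ih =>
    intro S v hf
    obtain ⟨n, rfl⟩ : ∃ n, fuel = n + 1 := ⟨fuel - 1, by omega⟩
    rw [pvRun]
    split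
    next p hl =>
      by_cases hp : p ∈ v
      · rw [if_pos (by simpa using hp), ih S v hf]
        simp [pvGoList, pvGoA, hl, hp]
      · rw [if_neg (by simpa using hp)]
        have hlt : pvUnseen cids (PySem.Set.add v p) < pvUnseen cids v :=
          pvUnseen_add_lt v hl (by simpa using hp)
        -- B descends: split off the pushed frame with the outer IH at fuel n
        rw [ihf n (by omega) ((pvLookupMap cmap p).getD []) (cs :: S)
          (PySem.Set.add v p) (by omega)]
        -- then split off cs with the inner IH, at the visited set A's recursion produced
        have hmono : ∀ x : Int, x ∈ PySem.Set.add v p →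
            x ∈ (pvGoList cmap cids n ((pvLookupMap cmap p).getD []) (PySem.Set.add v p)).2 :=
          fun x hx => (pvGo_mono n cmap cids).2 _ _ x hx
        have hf2 : pvUnseen cids
            (pvGoList cmap cids n ((pvLookupMap cmap p).getD []) (PySem.Set.add v p)).2 + 1
            ≤ n + 1 := by
          have := pvUnseen_mono (category_ids := cids) hmono
          omega
        rw [ih S _ hf2]
        -- A's side: one step of pvGoList, with pvGoA unfolded on the unvisited page id
        simp [pvGoList, hl, pvGoA_succ_not_mem hp]
    next hl =>
      rw [ih S v hf]
      simp [pvGoList, hl]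

-- ===== VERDICT (by name: the statement is the Claim_ definition above) =====
theorem get_full_hierarchy_spec : Claim_equal_get_full_hierarchy := by
  intro page_id category_map category_ids visited _
  unfold Spec_get_full_hierarchy get_full_hierarchy get_full_hierarchy_alt
  by_cases h0 : page_id ∈ PySem.Set.ofList (visited.getD [])
  · simp [pvGoA, h0]
  · rw [if_neg (by simpa using h0)]
    rw [show category_ids.length + 2 = (category_ids.length + 1) + 1 from rfl]
    rw [pvGoA_succ_not_mem h0]
    rw [pvBridge (category_ids.length + 1) category_map category_ids _ []
      (PySem.Set.add (PySem.Set.ofList (visited.getD [])) page_id)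
      (by have := pvUnseen_le category_ids (PySem.Set.add (PySem.Set.ofList (visited.getD [])) page_id); omega)]
    simp [pvRun]
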